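-- pv_equiv track=rewrite | github.com/t-kohler/RICE13_FS | common/.ipynb_checkpoints/utils-checkpoint.py | _order_by_size_gray
-- ===== SOURCE A (Python) =====
-- from typing import Dict, Any, Optional, List, Tuple, Iterable, Sequence, Mapping
--
-- def _gray_order(n: int) -> List[Tuple[int, ...]]:
--     """Return N-bit Gray code as tuples of 0/1 in MSB→LSB order."""
--     out: List[Tuple[int, ...]] = []
--     for i in range(1 << n):
--         g = i ^ (i >> 1)
--         out.append(tuple((g >> j) & 1 for j in range(n - 1, -1, -1)))
--     return out
--
-- def _order_by_size_gray(vectors: List[Tuple[int, ...]]) -> List[Tuple[int, ...]]: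
--     """Bucket by Hamming weight; within each bucket, Gray order."""
--     if not vectors:
--         return []
--     N = len(vectors[0])
--     present = {tuple(v) for v in vectors}
--     gray = _gray_order(N)
--     ordered: List[Tuple[int, ...]] = []
--     for k in range(1, N + 1):
--         bucket = [v for v in gray if sum(v) == k and v in present]
--         ordered.extend(bucket)
--     return ordered
-- ===== SOURCE B (Python) =====
-- def _order_by_size_gray(vectors):
--     """Single sweep over the Gray sequence, distributing kept vectors into weight buckets."""
--     if not vectors:
--         return []
--     N = len(vectors[0])
--     present = {tuple(v) for v in vectors}
--     buckets = [[] for _ in range(N + 1)]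
--     for i in range(1 << N):
--         g = i ^ (i >> 1)
--         v = tuple((g >> j) & 1 for j in reversed(range(N)))
--         if v in present:
--             buckets[sum(v)].append(v)
--     out = []
--     for bucket in buckets[1:]:
--         out += bucket
--     return out
-- ===== Notes on version B (the rewrite author's own statement) =====
-- stated objective: faster
-- what changed: A scans the full 2^N-element Gray sequence once per Hamming weight k=1..N with a filtering pass each time; B makes a single sweep over the Gray sequence, distributing each kept vector into a weight-indexed bucket array, and then concatenates buckets 1..N.
import Mathlib
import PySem

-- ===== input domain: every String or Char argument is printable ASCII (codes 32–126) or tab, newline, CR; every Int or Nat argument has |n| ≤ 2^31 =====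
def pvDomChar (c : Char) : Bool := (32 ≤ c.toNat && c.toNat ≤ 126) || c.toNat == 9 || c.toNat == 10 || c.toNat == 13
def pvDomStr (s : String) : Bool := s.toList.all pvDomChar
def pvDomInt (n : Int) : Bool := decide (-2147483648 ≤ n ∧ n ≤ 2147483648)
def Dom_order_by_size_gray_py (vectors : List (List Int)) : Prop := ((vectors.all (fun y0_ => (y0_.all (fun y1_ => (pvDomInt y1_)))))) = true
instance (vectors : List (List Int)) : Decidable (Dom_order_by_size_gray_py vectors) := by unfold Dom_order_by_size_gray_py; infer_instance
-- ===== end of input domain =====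

-- B replaces A's N filtering passes over the full Gray list by ONE sweep that distributes
-- kept vectors into weight buckets (objective: faster — one pass instead of N).

-- ===== PORT A =====
-- helper _gray_order; 'i >> 1' / '(g >> j) & 1' ported with '>>>' / PySem.Int.band (exact: all i, g, j here are ≥ 0)
def pv_gray_order (n : Int) : List (List Int) :=
  (PySem.List.pyRange 0 ((1:Int) <<< n.toNat) 1).foldl
    (fun out i =>
      let g : Int := PySem.Int.bxor i (i >>> (1:Nat))
      out ++ [(PySem.List.pyRange (n - 1) (-1) (-1)).map (fun j => PySem.Int.band (g >>> j.toNat) 1)])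
    []

-- vectors[0] is vectors.headI (guarded by the emptiness test, as in the Python)
def order_by_size_gray_py (vectors : List (List Int)) : List (List Int) :=
  if vectors = [] then []
  else
    let N : Int := (vectors.headI.length : Int)
    let present : PySem.Set (List Int) := PySem.Set.ofList vectors
    let gray := pv_gray_order N
    (PySem.List.pyRange 1 (N + 1) 1).foldl
      (fun ordered k => ordered ++ (gray.filter (fun v => v.sum == k && present.contains v)))
      []

-- ===== PORT B =====
-- single sweep over range(1 << N) (a Nat range: the bound is a power of two, all indices ≥ 0),
-- distributing each kept Gray vector into buckets[sum(v)], then concatenating buckets[1:]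
def order_by_size_gray_py_alt (vectors : List (List Int)) : List (List Int) :=
  if vectors = [] then []
  else
    let n := vectors.headI.length
    let present : PySem.Set (List Int) := PySem.Set.ofList vectors
    let buckets :=
      (List.range (2 ^ n)).foldl
        (fun bs i =>
          let g := i ^^^ (i >>> 1)
          let v := (List.range n).reverse.map (fun j => (((g >>> j) &&& 1 : Nat) : Int))
          if present.contains v then bs.set v.sum.toNat (bs[v.sum.toNat]! ++ [v]) else bs)
        (List.replicate (n + 1) ([] : List (List Int)))
    (buckets.drop 1).foldl (fun out b => out ++ b) []

-- ===== PRECONDITION & SPEC =====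
def Spec_order_by_size_gray_py (vectors : List (List Int)) (out : List (List Int)) : Prop := out = order_by_size_gray_py_alt vectors
instance (vectors : List (List Int)) (out : List (List Int)) : Decidable (Spec_order_by_size_gray_py vectors out) := by unfold Spec_order_by_size_gray_py; infer_instance

-- ===== CLAIM (what is proved, stated in full; the proofs are below) =====
def Claim_equal_order_by_size_gray_py : Prop := ∀ (vectors : List (List Int)), Dom_order_by_size_gray_py vectors → Spec_order_by_size_gray_py vectors (order_by_size_gray_py vectors)

-- ===== LEMMAS AND PROOFS =====

-- the common mathematical shape of the Gray vector of index i (n bits, MSB first)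
def pvVec (n i : Nat) : List Int :=
  (List.range n).map (fun t => ((((i ^^^ (i >>> 1)) >>> (n - 1 - t)) &&& 1 : Nat) : Int))

theorem pv_rev_range (n : Nat) :
    (List.range n).reverse = (List.range n).map (fun k => n - 1 - k) := by
  rw [List.range_eq_range', List.reverse_range']
  simp [← List.range_eq_range']

theorem pv_vecB_eq (n i : Nat) :
    (List.range n).reverse.map (fun j => ((((i ^^^ (i >>> 1)) >>> j) &&& 1 : Nat) : Int)) = pvVec n i := by
  rw [pv_rev_range, List.map_map]
  rfl

theorem pv_grayA_eq (n : Nat) :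
    pv_gray_order (n : Int) = (List.range (2 ^ n)).map (pvVec n) := by
  unfold pv_gray_order
  rw [PySem.List.foldl_append_singleton_eq_map, List.nil_append]
  have h2 : ((1:Int) <<< ((n:Int)).toNat) = ((2^n : Nat) : Int) := by simp [Int.shiftLeft_eq]
  rw [h2, PySem.List.pyRange_zero_nat, List.map_map]
  apply List.map_congr_left
  intro k _
  simp only [Function.comp_apply]
  rw [PySem.List.pyRange_neg_one]
  have h3 : (((n:Int) - 1) - (-1)).toNat = n := by omega
  rw [h3, List.map_map]
  unfold pvVec
  apply List.map_congr_left
  intro t ht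
  simp only [List.mem_range] at ht
  simp only [Function.comp_apply]
  have hj : ((n:Int) - 1 - (t:Int)) = ((n - 1 - t : Nat) : Int) := by omega
  rw [hj]
  have h5 : PySem.Int.bxor ((k:Int)) (((k:Int)) >>> ((1:Nat))) = (((k ^^^ (k >>> 1)) : Nat) : Int) := by
    rw [← Int.natCast_shiftRight k 1]
    exact_mod_cast PySem.Int.bxor_natCast k (k >>> 1)
  rw [h5]
  rw [Int.toNat_natCast, Int.shiftRight_natCast]
  exact_mod_cast PySem.Int.band_natCast ((k ^^^ (k >>> 1)) >>> (n - 1 - t)) 1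

theorem pv_sum_bits (l : List Int) (h : ∀ x ∈ l, 0 ≤ x ∧ x ≤ 1) :
    0 ≤ l.sum ∧ l.sum ≤ (l.length : Int) := by
  induction l with
  | nil => simp
  | cons a t ih =>
    have ha := h a (List.mem_cons_self ..)
    have ht := ih (fun x hx => h x (List.mem_cons_of_mem _ hx))
    simp only [List.sum_cons, List.length_cons]
    push_cast
    omega

theorem pv_vec_sum (n i : Nat) : 0 ≤ (pvVec n i).sum ∧ (pvVec n i).sum.toNat ≤ n := by
  have h := pv_sum_bits (pvVec n i) ?_
  · have hl : (pvVec n i).length = n := by simp [pvVec]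
    rw [hl] at h
    omega
  · intro x hx
    simp only [pvVec, List.mem_map] at hx
    obtain ⟨t, _, rfl⟩ := hx
    have h1 : ((i ^^^ (i >>> 1)) >>> (n - 1 - t)) &&& 1 ≤ 1 := Nat.and_le_right
    omega

theorem pv_bucket_spec (p : List Int → Bool) (gs : List (List Int)) :
    ∀ (bs : List (List (List Int))),
    (∀ v ∈ gs, 0 ≤ v.sum ∧ v.sum.toNat < bs.length) →
    (gs.foldl (fun bs v => if p v then bs.set v.sum.toNat (bs[v.sum.toNat]! ++ [v]) else bs) bs).length = bs.length ∧
    ∀ w, w < bs.length →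
      (gs.foldl (fun bs v => if p v then bs.set v.sum.toNat (bs[v.sum.toNat]! ++ [v]) else bs) bs)[w]! =
        bs[w]! ++ gs.filter (fun v => p v && v.sum.toNat == w) := by
  induction gs with
  | nil => intro bs _; simp
  | cons v gs ih =>
    intro bs h
    have hv := h v (List.mem_cons_self ..)
    have hrest : ∀ u ∈ gs, 0 ≤ u.sum ∧ u.sum.toNat < bs.length :=
      fun u hu => h u (List.mem_cons_of_mem _ hu)
    simp only [List.foldl_cons]
    by_cases hp : p v
    · rw [if_pos hp]
      have hlen' : (bs.set v.sum.toNat (bs[v.sum.toNat]! ++ [v])).length = bs.length :=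
        List.length_set ..
      obtain ⟨hL, hE⟩ := ih (bs.set v.sum.toNat (bs[v.sum.toNat]! ++ [v]))
        (fun u hu => by rw [hlen']; exact hrest u hu)
      refine ⟨by rw [hL, hlen'], ?_⟩
      intro w hw
      rw [hE w (by rw [hlen']; exact hw)]
      have hbs' : (bs.set v.sum.toNat (bs[v.sum.toNat]! ++ [v]))[w]! =
          if v.sum.toNat = w then bs[w]! ++ [v] else bs[w]! := by
        rcases eq_or_ne v.sum.toNat w with hw0 | hw0
        · subst hw0
          rw [if_pos rfl, getElem!_pos _ _ (by rw [hlen']; exact hv.2), List.getElem_set,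
            if_pos rfl, getElem!_pos bs _ hv.2]
        · rw [if_neg hw0, getElem!_pos _ w (by rw [hlen']; exact hw), getElem!_pos bs w hw,
            List.getElem_set, if_neg hw0]
      rw [hbs', List.filter_cons]
      by_cases hw0 : v.sum.toNat = w
      · simp [hp, hw0, List.append_assoc]
      · simp [hp, hw0]
    · rw [if_neg hp]
      obtain ⟨hL, hE⟩ := ih bs hrest
      refine ⟨hL, ?_⟩
      intro w hw
      rw [hE w hw, List.filter_cons]
      simp [hp]

-- ===== VERDICT (by name: the statement is the Claim_ definition above) =====
theorem order_by_size_gray_py_spec : Claim_equal_order_by_size_gray_py := by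
  intro vectors _
  unfold Spec_order_by_size_gray_py
  by_cases hv : vectors = []
  · simp [order_by_size_gray_py, order_by_size_gray_py_alt, hv]
  · simp only [order_by_size_gray_py, order_by_size_gray_py_alt, if_neg hv]
    set n := vectors.headI.length with hn
    set P : PySem.Set (List Int) := PySem.Set.ofList vectors with hP
    -- A side: N filter passes over the Gray list = flatMap over k = 1..n
    rw [pv_grayA_eq n, PySem.List.foldl_append_eq_flatMap, List.nil_append]
    have hr : PySem.List.pyRange 1 ((n:Int) + 1) 1 = (List.range n).map (fun k : Nat => 1 + (k:Int)) := by
      apply List.ext_getElem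
      · rw [PySem.List.length_pyRange_one, List.length_map, List.length_range]
        omega
      · intro w h1 h2
        simp only [PySem.List.getElem_pyRange_one, List.getElem_map, List.getElem_range]
    rw [hr, List.flatMap_map]
    -- B side: the swept vector is pvVec n i; pull the map out of the fold
    simp only [pv_vecB_eq]
    have hfold : (List.range (2 ^ n)).foldl
        (fun bs i => if P.contains (pvVec n i) then
            bs.set (pvVec n i).sum.toNat (bs[(pvVec n i).sum.toNat]! ++ [pvVec n i]) else bs)
        (List.replicate (n + 1) ([] : List (List Int)))
      = ((List.range (2 ^ n)).map (pvVec n)).foldl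
        (fun bs v => if P.contains v then bs.set v.sum.toNat (bs[v.sum.toNat]! ++ [v]) else bs)
        (List.replicate (n + 1) ([] : List (List Int))) := by
      rw [List.foldl_map]
    rw [hfold]
    have hmem : ∀ v ∈ (List.range (2 ^ n)).map (pvVec n),
        0 ≤ v.sum ∧ v.sum.toNat < (List.replicate (n + 1) ([] : List (List Int))).length := by
      intro v hvm
      obtain ⟨i, _, rfl⟩ := List.mem_map.mp hvm
      have := pv_vec_sum n i
      rw [List.length_replicate]
      omega
    obtain ⟨hL, hE⟩ := pv_bucket_spec (fun v => P.contains v) ((List.range (2 ^ n)).map (pvVec n))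
      (List.replicate (n + 1) ([] : List (List Int))) hmem
    have hbuckets :
        ((List.range (2 ^ n)).map (pvVec n)).foldl
          (fun bs v => if P.contains v then bs.set v.sum.toNat (bs[v.sum.toNat]! ++ [v]) else bs)
          (List.replicate (n + 1) ([] : List (List Int))) =
        (List.range (n + 1)).map
          (fun w => ((List.range (2 ^ n)).map (pvVec n)).filter
            (fun v => P.contains v && v.sum.toNat == w)) := by
      apply List.ext_getElem
      · rw [hL]
        simp
      · intro w h1 h2
        have hw : w < n + 1 := by simpa using h2
        rw [← getElem!_pos _ w h1, hE w (by simpa using hw)]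
        rw [getElem!_pos _ w (by simpa using hw), List.getElem_replicate]
        simp
    rw [hbuckets, List.range_succ_eq_map, List.map_cons, List.map_map]
    rw [List.drop_one, List.tail_cons]
    rw [PySem.List.foldl_append_eq_flatten, List.nil_append]
    rw [List.flatMap_def]
    congr 1
    apply List.map_congr_left
    intro k _
    simp only [Function.comp_apply]
    apply List.filter_congr
    intro v hvm
    obtain ⟨i, _, rfl⟩ := List.mem_map.mp hvm
    have h0 := (pv_vec_sum n i).1
    rw [Bool.and_comm]
    congr 1
    rw [Bool.eq_iff_iff]
    simp only [beq_iff_eq]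
    omega
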